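-- pv_equiv track=rewrite | github.com/Peter-M-S/EverybodyCodes | Event2024/Q12P123.py | get_arrays
-- ===== SOURCE A (Python) =====
-- def get_arrays(notes: str) -> tuple:
--   grid = notes.split("\n")[::-1]
--   segments, targets, hardrocks = dict(), set(), set()
--   for r, row in enumerate(grid):
--     for c, s in enumerate(row):
--       if s in "ABC":
--         segments[s] = (r, c)
--       elif s == "T":
--         targets.add((r, c))
--       elif s == "H":
--         targets.add((r, c))
--         hardrocks.add((r, c))
--   return segments, targets, hardrocks
-- ===== SOURCE B (Python) =====
-- def get_arrays(notes: str) -> tuple: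
--     grid = notes.split("\n")[::-1]
--     cells = [(r, c, s) for r, row in enumerate(grid) for c, s in enumerate(row)]
--     segments = {s: (r, c) for r, c, s in cells if s in "ABC"}
--     targets = {(r, c) for r, c, s in cells if s in "TH"}
--     hardrocks = {(r, c) for r, c, s in cells if s == "H"}
--     return segments, targets, hardrocks
-- ===== Notes on version B (the rewrite author's own statement) =====
-- stated objective: alternative
-- what changed: Instead of classifying cells inline in a nested loop with three shared accumulators, B first flattens the reversed grid into a single list of (r,c,char) cells and then derives each of the three outputs by an independent comprehension over that list (dict comprehension for segments, set comprehensions for targets and hardrocks).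
import Mathlib
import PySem

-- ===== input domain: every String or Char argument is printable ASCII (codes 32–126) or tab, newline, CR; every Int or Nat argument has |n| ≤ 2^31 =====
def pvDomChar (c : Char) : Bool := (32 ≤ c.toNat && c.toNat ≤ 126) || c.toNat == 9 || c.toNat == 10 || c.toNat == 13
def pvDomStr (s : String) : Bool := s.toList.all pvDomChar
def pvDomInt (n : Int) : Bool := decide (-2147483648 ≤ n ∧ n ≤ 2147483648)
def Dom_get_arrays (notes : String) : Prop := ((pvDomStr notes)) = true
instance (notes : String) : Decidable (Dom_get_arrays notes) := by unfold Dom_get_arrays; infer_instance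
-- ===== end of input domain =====

-- B flattens the grid into one cell list and derives the three outputs by independent passes
-- (alternative decomposition, same asymptotic cost); A classifies inline with shared state.

-- ===== PORT A =====
-- A's per-cell step on the shared triple state (segments dict, targets set, hardrocks set)
def pvStepA (st : PySem.Dict String (Int × Int) × PySem.Set (Int × Int) × PySem.Set (Int × Int))
    (r c : Int) (s : Char) :
    PySem.Dict String (Int × Int) × PySem.Set (Int × Int) × PySem.Set (Int × Int) :=
  if s = 'A' ∨ s = 'B' ∨ s = 'C' then (st.1.insert (String.ofList [s]) (r, c), st.2.1, st.2.2)
  else if s = 'T' then (st.1, st.2.1.add (r, c), st.2.2)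
  else if s = 'H' then (st.1, st.2.1.add (r, c), st.2.2.add (r, c))
  else st

def get_arrays (notes : String) : (List (String × Int × Int)) × (List (Int × Int)) × (List (Int × Int)) :=
  let grid := ((PySem.Str.split? notes "\n").getD []).reverse
  let fin := (PySem.List.enumerate grid 0).foldl
    (fun st rp => (PySem.List.enumerate rp.2.toList 0).foldl
      (fun st cp => pvStepA st rp.1 cp.1 cp.2) st)
    (PySem.Dict.empty, PySem.Set.empty, PySem.Set.empty)
  (fin.1.items, fin.2.1, fin.2.2)

-- ===== PORT B =====
def pvCells (notes : String) : List (Int × Int × Char) :=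
  let grid := ((PySem.Str.split? notes "\n").getD []).reverse
  (PySem.List.enumerate grid 0).flatMap
    (fun rp => (PySem.List.enumerate rp.2.toList 0).map (fun cp => (rp.1, cp.1, cp.2)))

-- the three independent comprehension steps of B
def pvSegStep (d : PySem.Dict String (Int × Int)) (x : Int × Int × Char) : PySem.Dict String (Int × Int) :=
  if x.2.2 = 'A' ∨ x.2.2 = 'B' ∨ x.2.2 = 'C' then d.insert (String.ofList [x.2.2]) (x.1, x.2.1) else d
def pvTgtStep (t : PySem.Set (Int × Int)) (x : Int × Int × Char) : PySem.Set (Int × Int) :=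
  if x.2.2 = 'T' ∨ x.2.2 = 'H' then t.add (x.1, x.2.1) else t
def pvRockStep (h : PySem.Set (Int × Int)) (x : Int × Int × Char) : PySem.Set (Int × Int) :=
  if x.2.2 = 'H' then h.add (x.1, x.2.1) else h

def get_arrays_alt (notes : String) : (List (String × Int × Int)) × (List (Int × Int)) × (List (Int × Int)) :=
  let cells := pvCells notes
  let segments := cells.foldl pvSegStep PySem.Dict.empty
  let targets := cells.foldl pvTgtStep PySem.Set.empty
  let hardrocks := cells.foldl pvRockStep PySem.Set.empty
  (segments.items, targets, hardrocks)

-- ===== PRECONDITION & SPEC =====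
def Spec_get_arrays (notes : String) (out : (List (String × Int × Int)) × (List (Int × Int)) × (List (Int × Int))) : Prop := out = get_arrays_alt notes
instance (notes : String) (out : (List (String × Int × Int)) × (List (Int × Int)) × (List (Int × Int))) : Decidable (Spec_get_arrays notes out) := by unfold Spec_get_arrays; infer_instance

-- ===== CLAIM (what is proved, stated in full; the proofs are below) =====
def Claim_equal_get_arrays : Prop := ∀ (notes : String), Dom_get_arrays notes → Spec_get_arrays notes (get_arrays notes)

-- ===== LEMMAS AND PROOFS =====

-- folding over a flatMap is the nested fold
theorem pv_foldl_flatMap {α β γ : Type} (f : β → List γ) (g : α → γ → α) (l : List β) (init : α) :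
    (l.flatMap f).foldl g init = l.foldl (fun acc x => (f x).foldl g acc) init := by
  induction l generalizing init with
  | nil => rfl
  | cons y ys ih => simp [List.flatMap_cons, List.foldl_append, ih]

-- a fold whose step acts componentwise on a triple splits into three folds
theorem pv_foldl_triple {α β γ δ : Type} (l : List δ)
    (f : α → δ → α) (g : β → δ → β) (h : γ → δ → γ) (F : α × β × γ → δ → α × β × γ)
    (hF : ∀ s x, F s x = (f s.1 x, g s.2.1 x, h s.2.2 x)) :
    ∀ (a : α) (b : β) (c : γ), l.foldl F (a, b, c) = (l.foldl f a, l.foldl g b, l.foldl h c) := by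
  induction l with
  | nil => intro a b c; rfl
  | cons y ys ih => intro a b c; simp only [List.foldl_cons, hF]; exact ih _ _ _

-- A's combined step is componentwise the three steps of B
theorem pv_stepA_split (st : PySem.Dict String (Int × Int) × PySem.Set (Int × Int) × PySem.Set (Int × Int))
    (x : Int × Int × Char) :
    pvStepA st x.1 x.2.1 x.2.2 = (pvSegStep st.1 x, pvTgtStep st.2.1 x, pvRockStep st.2.2 x) := by
  obtain ⟨r, c, s⟩ := x
  obtain ⟨d, t, h⟩ := st
  simp only [pvStepA, pvSegStep, pvTgtStep, pvRockStep]
  split_ifs <;> simp_all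

-- A's nested loop computes the fold of pvStepA over the flattened cell list
theorem pv_A_as_cells (notes : String) :
    (PySem.List.enumerate (((PySem.Str.split? notes "\n").getD []).reverse) 0).foldl
      (fun st rp => (PySem.List.enumerate rp.2.toList 0).foldl
        (fun st cp => pvStepA st rp.1 cp.1 cp.2) st)
      (PySem.Dict.empty, PySem.Set.empty, PySem.Set.empty)
    = (pvCells notes).foldl (fun st x => pvStepA st x.1 x.2.1 x.2.2)
        (PySem.Dict.empty, PySem.Set.empty, PySem.Set.empty) := by
  unfold pvCells
  rw [pv_foldl_flatMap]
  simp only [List.foldl_map]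

-- ===== VERDICT (by name: the statement is the Claim_ definition above) =====
theorem get_arrays_spec : Claim_equal_get_arrays := by
  intro notes _
  show get_arrays notes = get_arrays_alt notes
  simp only [get_arrays, get_arrays_alt]
  rw [pv_A_as_cells notes,
    pv_foldl_triple (pvCells notes) pvSegStep pvTgtStep pvRockStep _
      (fun st x => pv_stepA_split st x)]
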